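-- pv_equiv track=rewrite | github.com/tomszym4/web_scraper_v2 | scraper_main.py | clean_date_element
-- ===== SOURCE A (Python) =====
-- def clean_date_element(temp_string):
--     """Throws away any signs and letters from provided string"""
--     try:
--         element = ""
--         for c in temp_string:
--             if c.isnumeric():
--                 element += c
--             elif c == "." or c == "-" or c == ":":
--                 element += "."
--         date_list = element.split(".")
--         return date_list
--     except:
--         return "Something went wrong with processing date"
-- ===== SOURCE B (Python) =====
-- def clean_date_element(temp_string):
--     """Throws away any signs and letters from provided string"""
--     try:
--         parts = []
--         cur = ""
--         for c in temp_string: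
--             if c.isnumeric():
--                 cur += c
--             elif c == "." or c == "-" or c == ":":
--                 parts.append(cur)
--                 cur = ""
--         parts.append(cur)
--         return parts
--     except:
--         return "Something went wrong with processing date"
-- ===== Notes on version B (the rewrite author's own statement) =====
-- stated objective: alternative
-- what changed: B builds the parts list directly in a single pass with an output list and a current-token accumulator, instead of first building a filtered string and then splitting it on the dot separator.
import Mathlib
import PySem

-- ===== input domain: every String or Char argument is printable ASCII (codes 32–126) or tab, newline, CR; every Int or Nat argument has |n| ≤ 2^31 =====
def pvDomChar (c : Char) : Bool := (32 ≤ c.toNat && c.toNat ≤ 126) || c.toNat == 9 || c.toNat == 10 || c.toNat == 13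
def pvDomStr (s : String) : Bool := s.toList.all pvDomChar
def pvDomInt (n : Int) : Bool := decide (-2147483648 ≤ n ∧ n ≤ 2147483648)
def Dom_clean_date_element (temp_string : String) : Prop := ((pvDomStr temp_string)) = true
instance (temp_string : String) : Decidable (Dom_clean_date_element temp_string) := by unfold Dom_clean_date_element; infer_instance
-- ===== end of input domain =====

-- B builds the parts list in one pass with an accumulator instead of filter-then-split; return values proved equal on all Dom strings.
-- (Python's c.isnumeric() is ported as PySem.Chars.isdigit, exact on the ASCII domain Dom states.)

-- ===== PORT A =====
-- element = ""; for c in temp_string: …  — a foldl building the filtered char list, then split(".")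
def clean_date_element (temp_string : String) : List String :=
  (PySem.Chars.splitOn
    (temp_string.toList.foldl
      (fun acc c =>
        if PySem.Chars.isdigit c then acc ++ [c]
        else if c = '.' ∨ c = '-' ∨ c = ':' then acc ++ ['.']
        else acc) [])
    ['.']).map String.ofList

-- ===== PORT B =====
-- one pass: parts list + current token
def cleanLoopB : List Char → List (List Char) → List Char → List (List Char)
  | [], parts, cur => parts ++ [cur]
  | c :: rest, parts, cur =>
    if PySem.Chars.isdigit c then cleanLoopB rest parts (cur ++ [c])
    else if c = '.' ∨ c = '-' ∨ c = ':' then cleanLoopB rest (parts ++ [cur]) []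
    else cleanLoopB rest parts cur

def clean_date_element_alt (temp_string : String) : List String :=
  (cleanLoopB temp_string.toList [] []).map String.ofList

-- ===== PRECONDITION & SPEC =====
def Spec_clean_date_element (temp_string : String) (out : List String) : Prop := out = clean_date_element_alt temp_string
instance (temp_string : String) (out : List String) : Decidable (Spec_clean_date_element temp_string out) := by unfold Spec_clean_date_element; infer_instance

-- ===== CLAIM (what is proved, stated in full; the proofs are below) =====
def Claim_equal_clean_date_element : Prop := ∀ (temp_string : String), Dom_clean_date_element temp_string → Spec_clean_date_element temp_string (clean_date_element temp_string)

-- ===== LEMMAS AND PROOFS =====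

-- split on a single '.' separator, reference form: pre is the token accumulated so far
def splitD (pre : List Char) : List Char → List (List Char)
  | [] => [pre]
  | c :: rest => if c = '.' then pre :: splitD [] rest else splitD (pre ++ [c]) rest

lemma go_spec (l : List Char) : ∀ (fuel : Nat) (cur : List Char) (acc : List (List Char)),
    l.length < fuel →
    PySem.Chars.splitOn.go ['.'] fuel l cur acc = acc.reverse ++ splitD cur.reverse l := by
  induction l with
  | nil =>
    intro fuel cur acc h
    obtain ⟨n, rfl⟩ : ∃ n, fuel = n + 1 := ⟨fuel - 1, by omega⟩
    simp [PySem.Chars.splitOn.go, splitD]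
  | cons c rest ih =>
    intro fuel cur acc h
    obtain ⟨n, rfl⟩ : ∃ n, fuel = n + 1 := ⟨fuel - 1, by omega⟩
    by_cases hc : c = '.'
    · subst hc
      rw [show PySem.Chars.splitOn.go ['.'] (n+1) ('.' :: rest) cur acc
            = PySem.Chars.splitOn.go ['.'] n rest [] (cur.reverse :: acc) by
          simp [PySem.Chars.splitOn.go, List.isPrefixOf]]
      rw [ih n [] (cur.reverse :: acc) (by simpa using h)]
      simp [splitD]
    · rw [show PySem.Chars.splitOn.go ['.'] (n+1) (c :: rest) cur acc
            = PySem.Chars.splitOn.go ['.'] n rest (c :: cur) acc by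
          have hb : ('.' == c) = false := beq_eq_false_iff_ne.mpr (fun h => hc h.symm)
          simp [PySem.Chars.splitOn.go, List.isPrefixOf, hb]]
      rw [ih n (c :: cur) acc (by simpa using h)]
      simp [splitD, hc]

lemma splitOn_eq_splitD (l : List Char) : PySem.Chars.splitOn l ['.'] = splitD [] l := by
  unfold PySem.Chars.splitOn
  rw [go_spec l (l.length + 1) [] [] (by omega)]
  simp

-- the filtered characters A accumulates
def filt : List Char → List Char
  | [] => []
  | c :: rest =>
    if PySem.Chars.isdigit c then c :: filt rest
    else if c = '.' ∨ c = '-' ∨ c = ':' then '.' :: filt rest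
    else filt rest

lemma foldl_eq_filt (l : List Char) : ∀ acc : List Char,
    l.foldl (fun acc c =>
        if PySem.Chars.isdigit c then acc ++ [c]
        else if c = '.' ∨ c = '-' ∨ c = ':' then acc ++ ['.']
        else acc) acc = acc ++ filt l := by
  induction l with
  | nil => simp [filt]
  | cons c rest ih =>
    intro acc
    simp only [List.foldl_cons, filt]
    split_ifs <;> simp [ih]

lemma isdigit_ne_dot {c : Char} (h : PySem.Chars.isdigit c = true) : c ≠ '.' := by
  intro hc; subst hc; simp [PySem.Chars.isdigit] at h

lemma cleanLoopB_eq_splitD (l : List Char) : ∀ (parts : List (List Char)) (cur : List Char),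
    cleanLoopB l parts cur = parts ++ splitD cur (filt l) := by
  induction l with
  | nil => intro parts cur; simp [cleanLoopB, filt, splitD]
  | cons c rest ih =>
    intro parts cur
    simp only [cleanLoopB, filt]
    split_ifs with h1 h2
    · rw [ih]
      simp [splitD, isdigit_ne_dot h1]
    · rw [ih]
      simp [splitD]
    · rw [ih]

-- ===== VERDICT (by name: the statement is the Claim_ definition above) =====
theorem clean_date_element_spec : Claim_equal_clean_date_element := by
  intro s _
  unfold Spec_clean_date_element clean_date_element clean_date_element_alt
  rw [foldl_eq_filt, cleanLoopB_eq_splitD, splitOn_eq_splitD]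
  simp
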